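-- pv_equiv track=rewrite | github.com/firebat75/l33ts | 216/216.py | solution
-- ===== SOURCE A (Python) =====
-- def solution(k, n):
--     def backtracking(path, nums, k, n):
--         path.sort()
--
--         if k == 0 and n == 0 and path not in output:
--             output.append(path)
--         elif k < 0 or n < 0:
--             pass
--         else:
--             for i in range(len(nums)):
--                 if nums[i] + (k - 1) > n:
--                     break
--                 backtracking(
--                     path + [nums[i]], nums[:i] + nums[i + 1 :], k - 1, n - nums[i]
--                 )
--
--     output = []
--     backtracking([], list(range(1, 9)), k, n)
--
--     return output
-- ===== SOURCE B (Python) =====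
-- def solution(k, n):
--     subsets = [[]]
--     for d in range(8, 0, -1):
--         subsets = [[d] + c for c in subsets] + subsets
--     return [c for c in subsets if len(c) == k and sum(c) == n]
-- ===== Notes on version B (the rewrite author's own statement) =====
-- stated objective: faster
-- what changed: A recursively tries k distinct digits in every order, sorts each path and deduplicates against the output list; B does no search at all: it builds the 256-element powerset of the digits 1..8 with one iterative fold (digits taken 8 down to 1, which yields exactly A's output order) and filters it by length k and sum n.
import Mathlib
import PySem

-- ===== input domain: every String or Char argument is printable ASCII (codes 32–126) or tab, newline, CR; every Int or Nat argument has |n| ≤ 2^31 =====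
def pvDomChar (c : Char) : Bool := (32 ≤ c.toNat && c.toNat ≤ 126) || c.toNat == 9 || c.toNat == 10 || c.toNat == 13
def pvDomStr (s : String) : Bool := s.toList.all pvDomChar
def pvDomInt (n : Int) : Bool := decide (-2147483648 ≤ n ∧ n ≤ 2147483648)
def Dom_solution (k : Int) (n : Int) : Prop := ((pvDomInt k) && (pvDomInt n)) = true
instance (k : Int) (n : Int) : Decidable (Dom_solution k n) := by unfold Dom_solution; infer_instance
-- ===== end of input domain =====

-- B replaces A's recursive permutation-with-dedup search by a loop-free strategy: build the
-- powerset of the digits 1..8 with one iterative fold and filter it by length k and sum n.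

-- ===== PORT A =====
-- Python's recursion terminates because nums shrinks by one at each level; fuel 9 > |list(range(1,9))| = 8 is never exhausted.
mutual
def backA : Nat → List Int → List Int → Int → Int → List (List Int) → List (List Int)
  | 0, _, _, _, _, out => out
  | Nat.succ fuel, path, nums, k, n, out =>
    let p := PySem.List.sorted path (fun x : Int => x) false   -- path.sort()
    if k = 0 ∧ n = 0 ∧ p ∉ out then out ++ [p]
    else if k < 0 ∨ n < 0 then out
    else loopA fuel p [] nums k n out
  termination_by fuel _ _ _ _ _ => (fuel, 0)
def loopA : Nat → List Int → List Int → List Int → Int → Int → List (List Int) → List (List Int)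
  | _, _, _, [], _, _, out => out
  | fuel, p, pre, x :: rs, k, n, out =>
    if x + (k - 1) > n then out    -- break
    else loopA fuel p (pre ++ [x]) rs k n
      (backA fuel (p ++ [x]) (pre ++ rs) (k - 1) (n - x) out)
  termination_by fuel _ _ rest _ _ _ => (fuel, rest.length + 1)
end

def solution (k : Int) (n : Int) : List (List Int) :=
  backA 9 [] (PySem.List.pyRange 1 9 1) k n []

-- ===== PORT B =====
def solution_alt (k : Int) (n : Int) : List (List Int) :=
  let subsets := (PySem.List.pyRange 8 0 (-1)).foldl
    (fun acc d => acc.map (fun c => d :: c) ++ acc) [[]]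
  subsets.filter (fun c => decide ((c.length : Int) = k ∧ c.sum = n))

-- ===== PRECONDITION & SPEC =====
def Spec_solution (k : Int) (n : Int) (out : List (List Int)) : Prop := out = solution_alt k n
instance (k : Int) (n : Int) (out : List (List Int)) : Decidable (Spec_solution k n out) := by unfold Spec_solution; infer_instance

-- ===== CLAIM (what is proved, stated in full; the proofs are below) =====
def Claim_equal_solution : Prop := ∀ (k : Int) (n : Int), Dom_solution k n → Spec_solution k n (solution k n)

-- ===== LEMMAS AND PROOFS =====

-- the common specification: combinations (as increasing sublists) of L with length k and sum n, in lexicographic order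
def C (L : List Int) (k n : Int) : List (List Int) :=
  if k = 0 then (if n = 0 then [[]] else [])
  else if k < 0 then []
  else match L with
    | [] => []
    | x :: xs => ((C xs (k - 1) (n - x)).map (x :: ·)) ++ C xs k n

def dsort (l : List Int) : List Int := PySem.List.sorted l (fun x : Int => x) false

-- F out L : append the members of L not already present (Python's `if path not in output: output.append(path)` fold)
def F (out L : List (List Int)) : List (List Int) := out ++ L.filter (fun s => decide (s ∉ out))

-- ---- generic list helpers ----

theorem filter_filter_of_imp {α : Type} (l : List α) (p q : α → Bool)
    (h : ∀ y ∈ l, q y = false → p y = false) : l.filter p = (l.filter q).filter p := by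
  induction l with
  | nil => rfl
  | cons y t ih =>
    have ht : ∀ z ∈ t, q z = false → p z = false := fun z hz => h z (List.mem_cons_of_mem _ hz)
    by_cases hq : q y = true
    · simp only [List.filter_cons, hq, if_pos]
      by_cases hp : p y = true <;> simp [hp, ih ht]
    · have hq' : q y = false := by revert hq; cases q y <;> simp
      have hp' : p y = false := h y (List.mem_cons_self) hq'
      simp [hq', hp', ih ht]

theorem pairwise_lt_of_le_nodup (l : List Int) (h1 : l.Pairwise (· ≤ ·)) (h2 : l.Nodup) :
    l.Pairwise (· < ·) := by
  induction l with
  | nil => exact List.Pairwise.nil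
  | cons x t ih =>
    rw [List.pairwise_cons] at h1 ⊢
    rw [List.nodup_cons] at h2
    exact ⟨fun y hy => lt_of_le_of_ne (h1.1 y hy) (by rintro rfl; exact h2.1 hy),
      ih h1.2 h2.2⟩

theorem len_le_sum (l : List Int) (h : ∀ y ∈ l, 1 ≤ y) : (l.length : Int) ≤ l.sum := by
  induction l with
  | nil => simp
  | cons y t ih =>
    have := ih (fun z hz => h z (List.mem_cons_of_mem _ hz))
    have := h y (List.mem_cons_self)
    simp only [List.length_cons, List.sum_cons]
    push_cast
    omega

theorem sublist_of_sorted_subset : ∀ (L S : List Int), L.Pairwise (· < ·) → S.Pairwise (· < ·) →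
    (∀ a ∈ S, a ∈ L) → S.Sublist L := by
  intro L
  induction L with
  | nil =>
    intro S _ _ hsub
    have : S = [] := by
      cases S with
      | nil => rfl
      | cons s t => exact absurd (hsub s (List.mem_cons_self)) (List.not_mem_nil)
    simp [this]
  | cons x L' ihL =>
    intro S hL hS hsub
    cases S with
    | nil => exact List.nil_sublist _
    | cons s S' =>
      rw [List.pairwise_cons] at hS
      by_cases hsx : s = x
      · subst hsx
        apply List.Sublist.cons₂
        apply ihL S' (List.pairwise_cons.mp hL).2 hS.2
        intro a ha
        have ha' := hsub a (List.mem_cons_of_mem _ ha)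
        rcases List.mem_cons.mp ha' with h | h
        · exact absurd (h ▸ hS.1 a ha) (lt_irrefl _)
        · exact h
      · have hsL : s ∈ L' := by
          rcases List.mem_cons.mp (hsub s (List.mem_cons_self)) with h | h
          · exact absurd h hsx
          · exact h
        have hx_lt : x < s := (List.pairwise_cons.mp hL).1 s hsL
        apply List.Sublist.cons
        apply ihL (s :: S') (List.pairwise_cons.mp hL).2 (List.pairwise_cons.mpr hS)
        intro a ha
        have halt : s ≤ a := by
          rcases List.mem_cons.mp ha with h | h
          · omega
          · exact le_of_lt (hS.1 a h)
        rcases List.mem_cons.mp (hsub a ha) with h | h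
        · omega
        · exact h

-- ---- F lemmas ----

theorem mem_F_left {y : List Int} {out L : List (List Int)} (h : y ∈ out) : y ∈ F out L := by
  simp [F]; exact Or.inl h

theorem mem_F_of_mem {y : List Int} {out L : List (List Int)} (h : y ∈ L) : y ∈ F out L := by
  by_cases hy : y ∈ out
  · exact mem_F_left hy
  · simp [F, List.mem_filter]
    exact Or.inr ⟨h, hy⟩

theorem F_F (out L1 L2 : List (List Int)) (h : ∀ y ∈ L2, y ∉ L1) :
    F (F out L1) L2 = F out (L1 ++ L2) := by
  simp only [F, List.filter_append, List.append_assoc]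
  congr 2
  apply List.filter_congr
  intro y hy
  have hy1 := h y hy
  simp only [decide_eq_decide, List.mem_append, List.mem_filter]
  constructor
  · intro hc hco; exact hc (Or.inl hco)
  · rintro hc (hco | ⟨hcf, _⟩)
    · exact hc hco
    · exact hy1 hcf

-- ---- dsort lemmas ----

theorem dsort_perm (l : List Int) : (dsort l).Perm l := PySem.List.sorted_perm l (fun x => x) false

theorem dsort_congr {l l' : List Int} (h : l.Perm l') : dsort l = dsort l' :=
  PySem.List.sorted_eq_sorted_of_perm l l' (fun x => x) (fun _ _ h => h) h

theorem dsort_eq_self {l : List Int} (h : l.Pairwise (· < ·)) : dsort l = l :=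
  PySem.List.sorted_eq_self_of_pairwise l (fun x => x) (h.imp le_of_lt)

theorem dsort_inj_perm {l l' : List Int} (h : dsort l = dsort l') : l.Perm l' :=
  (PySem.List.sorted_id_eq_sorted_id_iff_perm (xs := l) (ys := l')).mp h

-- ---- C lemmas ----

theorem C_zero (L : List Int) (n : Int) : C L 0 n = if n = 0 then [[]] else [] := by
  rw [C.eq_def]; simp

theorem C_neg (L : List Int) {k : Int} (n : Int) (h : k < 0) : C L k n = [] := by
  rw [C.eq_def]; rw [if_neg (by omega), if_pos h]

theorem C_pos_nil {k : Int} (n : Int) (h : 0 < k) : C [] k n = [] := by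
  rw [C.eq_def]; rw [if_neg (by omega), if_neg (by omega)]

theorem C_pos_cons (x : Int) (xs : List Int) {k : Int} (n : Int) (h : 0 < k) :
    C (x :: xs) k n = ((C xs (k - 1) (n - x)).map (x :: ·)) ++ C xs k n := by
  rw [C.eq_def]; rw [if_neg (by omega), if_neg (by omega)]

-- the cons recurrence holds for every k, not only 0 < k
theorem C_cons_all (x : Int) (xs : List Int) (k n : Int) :
    C (x :: xs) k n = ((C xs (k - 1) (n - x)).map (x :: ·)) ++ C xs k n := by
  by_cases hk0 : k = 0
  · subst hk0
    rw [C_zero, C_zero, C_neg xs (n - x) (by omega)]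
    simp
  · by_cases hkn : k < 0
    · rw [C_neg _ _ hkn, C_neg _ _ (by omega : k - 1 < 0), C_neg _ _ hkn]
      simp
    · exact C_pos_cons _ _ _ (by omega)

theorem mem_C : ∀ (L : List Int) (k n : Int) (S : List Int), S ∈ C L k n →
    S.Sublist L ∧ (S.length : Int) = k ∧ S.sum = n := by
  intro L
  induction L with
  | nil =>
    intro k n S h
    by_cases hk0 : k = 0
    · subst hk0
      rw [C_zero] at h
      split_ifs at h with h2
      · simp at h; subst h; subst h2; simp
      · simp at h
    · by_cases hkn : k < 0
      · rw [C_neg _ _ hkn] at h; simp at h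
      · rw [C_pos_nil _ (by omega)] at h; simp at h
  | cons x xs ih =>
    intro k n S h
    by_cases hk0 : k = 0
    · subst hk0
      rw [C_zero] at h
      split_ifs at h with h2
      · simp at h; subst h; subst h2; exact ⟨List.nil_sublist _, by simp, by simp⟩
      · simp at h
    · by_cases hkn : k < 0
      · rw [C_neg _ _ hkn] at h; simp at h
      · rw [C_pos_cons _ _ _ (by omega)] at h
        rcases List.mem_append.mp h with h1 | h1
        · obtain ⟨S', hS', rfl⟩ := List.mem_map.mp h1
          obtain ⟨hsub, hlen, hsum⟩ := ih _ _ _ hS'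
          refine ⟨hsub.cons₂ x, ?_, ?_⟩
          · simp only [List.length_cons]; push_cast; omega
          · simp only [List.sum_cons]; omega
        · obtain ⟨hsub, hlen, hsum⟩ := ih _ _ _ h1
          exact ⟨hsub.cons x, hlen, hsum⟩

theorem mem_C_of : ∀ (L : List Int) (k n : Int) (S : List Int), S.Sublist L →
    (S.length : Int) = k → S.sum = n → S ∈ C L k n := by
  intro L
  induction L with
  | nil =>
    intro k n S hsub hlen hsum
    have : S = [] := List.sublist_nil.mp hsub
    subst this
    simp at hlen hsum
    rw [C.eq_def]; simp [← hlen, ← hsum]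
  | cons x xs ih =>
    intro k n S hsub hlen hsum
    cases hsub with
    | cons _ h =>
      by_cases hk0 : k = 0
      · have : S = [] := by
          have : S.length = 0 := by omega
          exact List.length_eq_zero_iff.mp this
        subst this
        subst hk0
        simp at hsum
        rw [C_zero]; simp [← hsum]
      · have hk : 0 < k := by
          have : (0:Int) ≤ S.length := by positivity
          omega
        rw [C_pos_cons _ _ _ hk]
        exact List.mem_append.mpr (Or.inr (ih _ _ _ h hlen hsum))
    | cons₂ _ h =>
      rename_i S'
      have hk : 0 < k := by
        simp only [List.length_cons] at hlen
        have : (0:Int) ≤ S'.length := by positivity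
        push_cast at hlen
        omega
      rw [C_pos_cons _ _ _ hk]
      apply List.mem_append.mpr (Or.inl _)
      apply List.mem_map.mpr
      refine ⟨S', ih _ _ _ h ?_ ?_, rfl⟩
      · simp only [List.length_cons] at hlen; push_cast at hlen ⊢; omega
      · simp only [List.sum_cons] at hsum; omega

theorem C_eq_nil (L : List Int) (k n x : Int) (hx : 1 ≤ x) (hL : ∀ y ∈ L, x ≤ y)
    (hk : 0 < k) (hn : n < x + (k - 1)) : C L k n = [] := by
  rw [List.eq_nil_iff_forall_not_mem]
  intro S hS
  obtain ⟨hsub, hlen, hsum⟩ := mem_C _ _ _ _ hS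
  have hss := hsub.subset
  cases S with
  | nil => simp at hlen; omega
  | cons s S' =>
    have hs : x ≤ s := hL s (hss (List.mem_cons_self))
    have h1 : ∀ y ∈ S', 1 ≤ y := fun y hy =>
      le_trans hx (hL y (hss (List.mem_cons_of_mem _ hy)))
    have h2 := len_le_sum S' h1
    simp only [List.length_cons, List.sum_cons] at hlen hsum
    push_cast at hlen
    omega

theorem C_filter : ∀ (ys zs : List Int) (k n : Int), (ys ++ zs).Nodup →
    (C (ys ++ zs) k n).filter (fun S => decide (∀ a ∈ ys, a ∉ S)) = C zs k n := by
  intro ys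
  induction ys with
  | nil =>
    intro zs k n _
    simp only [List.nil_append]
    apply List.filter_eq_self.mpr
    intro S _
    simp
  | cons y ys' ih =>
    intro zs k n hnd
    have hnd' : (ys' ++ zs).Nodup := (List.nodup_cons.mp hnd).2
    have hy : y ∉ ys' ++ zs := (List.nodup_cons.mp hnd).1
    by_cases hk0 : k = 0
    · subst hk0
      rw [C_zero, C_zero]
      split_ifs
      · simp
      · simp
    · by_cases hkn : k < 0
      · rw [C_neg _ _ hkn, C_neg _ _ hkn]; simp
      · have hk : 0 < k := by omega
        rw [List.cons_append, C_pos_cons _ _ _ hk, List.filter_append]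
        have h1 : ((C (ys' ++ zs) (k - 1) (n - y)).map (y :: ·)).filter
            (fun S => decide (∀ a ∈ y :: ys', a ∉ S)) = [] := by
          apply List.filter_eq_nil_iff.mpr
          intro S hS
          obtain ⟨S', _, rfl⟩ := List.mem_map.mp hS
          simp
        have h2 : (C (ys' ++ zs) k n).filter (fun S => decide (∀ a ∈ y :: ys', a ∉ S)) =
            (C (ys' ++ zs) k n).filter (fun S => decide (∀ a ∈ ys', a ∉ S)) := by
          apply List.filter_congr
          intro S hS
          obtain ⟨hsub, _, _⟩ := mem_C _ _ _ _ hS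
          simp only [decide_eq_decide, List.mem_cons]
          constructor
          · intro h a ha; exact h a (Or.inr ha)
          · rintro h a (rfl | ha)
            · intro haS; exact hy (hsub.subset haS)
            · exact h a ha
        rw [h1, h2, ih _ _ _ hnd']
        simp

-- ---- small port lemmas ----

theorem backA_neg (fuel : Nat) (path nums : List Int) {k : Int} (n : Int)
    (out : List (List Int)) (h : k < 0) : backA fuel path nums k n out = out := by
  cases fuel with
  | zero => rw [backA]
  | succ fuel =>
    rw [backA]
    rw [if_neg (by rintro ⟨h1, _⟩; omega), if_pos (Or.inl h)]

theorem loopA_id : ∀ (rest : List Int) (fuel : Nat) (p pre : List Int) {k : Int} (n : Int)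
    (out : List (List Int)), k ≤ 0 → loopA fuel p pre rest k n out = out := by
  intro rest
  induction rest with
  | nil => intro fuel p pre k n out _; rw [loopA]
  | cons x rs ih =>
    intro fuel p pre k n out hk
    rw [loopA]
    split_ifs with h
    · rfl
    · rw [backA_neg _ _ _ _ _ (by omega)]
      exact ih fuel p (pre ++ [x]) n out hk

-- ---- main lemma: port A computes the dedup-fold of the spec list ----

theorem backA_eq : ∀ (fuel : Nat) (path nums : List Int) (k n : Int) (out : List (List Int)),
    (path ++ nums).Nodup → nums.Pairwise (· < ·) → (∀ x ∈ nums, 0 < x) →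
    nums.length < fuel →
    backA fuel path nums k n out = F out ((C nums k n).map (fun S => dsort (path ++ S))) := by
  intro fuel
  induction fuel with
  | zero => intro path nums k n out _ _ _ h; omega
  | succ fuel IH =>
    intro path nums k n out hnd hsrt hpos hlen
    simp only [backA]
    set p : List Int := PySem.List.sorted path (fun x : Int => x) false with hp
    have hpperm : p.Perm path := dsort_perm path
    have hfun : ∀ S : List Int, dsort (p ++ S) = dsort (path ++ S) := fun S =>
      dsort_congr (hpperm.append_right S)
    have hdp : dsort path = p := rfl
    by_cases h1 : k = 0 ∧ n = 0 ∧ p ∉ out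
    · rw [if_pos h1]
      obtain ⟨hk0, hn0, hpo⟩ := h1; subst hk0; subst hn0
      rw [C_zero, if_pos rfl]
      simp [F, hdp, hpo]
    · rw [if_neg h1]
      by_cases h2 : k < 0 ∨ n < 0
      · rw [if_pos h2]
        have hC : C nums k n = [] := by
          by_cases hk0 : k = 0
          · subst hk0
            rw [C_zero, if_neg]
            rintro rfl
            rcases h2 with h | h <;> omega
          · by_cases hkn : k < 0
            · exact C_neg _ _ hkn
            · refine C_eq_nil _ _ _ 1 le_rfl ?_ (by omega) (by omega)
              intro y hy
              have := hpos y hy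
              omega
        rw [hC]; simp [F]
      · rw [if_neg h2]
        by_cases hk0 : k = 0
        · subst hk0
          rw [loopA_id _ _ _ _ _ _ le_rfl]
          rw [C_zero]
          by_cases hn0 : n = 0
          · subst hn0
            rw [if_pos rfl]
            have hpin : p ∈ out := by
              by_contra hq; exact h1 ⟨rfl, rfl, hq⟩
            simp [F, hdp, hpin]
          · rw [if_neg hn0]; simp [F]
        · have hk : 0 < k := by omega
          have hloop : ∀ (rest pre : List Int) (out : List (List Int)),
              (p ++ (pre ++ rest)).Nodup → (pre ++ rest).Pairwise (· < ·) →
              (∀ x ∈ pre ++ rest, 0 < x) → pre.length + rest.length ≤ fuel →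
              (∀ S : List Int, S.Pairwise (· < ·) → (∀ a ∈ S, a ∈ pre ++ rest) →
                (S.length : Int) = k → S.sum = n → (∃ a ∈ S, a ∈ pre) →
                dsort (p ++ S) ∈ out) →
              loopA fuel p pre rest k n out =
                F out ((C rest k n).map (fun S => dsort (p ++ S))) := by
            intro rest
            induction rest with
            | nil =>
              intro pre out _ _ _ _ _
              rw [loopA, C_pos_nil _ hk]
              simp [F]
            | cons x rs ihr =>
              intro pre out hnd2 hsrt2 hpos2 hlen2 hout
              have hxmem : x ∈ pre ++ x :: rs := List.mem_append.mpr (Or.inr List.mem_cons_self)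
              have hxpos : 0 < x := hpos2 x hxmem
              have hsrt_tail : (x :: rs).Pairwise (· < ·) :=
                hsrt2.sublist (List.sublist_append_right _ _)
              rw [loopA]
              by_cases hbr : x + (k - 1) > n
              · rw [if_pos hbr]
                have hC : C (x :: rs) k n = [] := by
                  refine C_eq_nil _ _ _ x (by omega) ?_ hk (by omega)
                  intro y hy
                  rcases List.mem_cons.mp hy with rfl | hy
                  · exact le_refl _
                  · exact le_of_lt ((List.pairwise_cons.mp hsrt_tail).1 y hy)
                rw [hC]; simp [F]
              · rw [if_neg hbr]
                have hndPR : (pre ++ x :: rs).Nodup := (List.nodup_append.mp hnd2).2.1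
                have hxnp : x ∉ p := fun hxp =>
                  (List.nodup_append.mp hnd2).2.2 x hxp x hxmem rfl
                have hxpre : x ∉ pre := fun hxpre =>
                  (List.nodup_append.mp hndPR).2.2 x hxpre x List.mem_cons_self rfl
                have hxrs : x ∉ rs :=
                  (List.nodup_cons.mp (List.nodup_append.mp hndPR).2.1).1
                have hsubPR : (pre ++ rs).Sublist (pre ++ x :: rs) :=
                  (List.sublist_cons_self x rs).append_left pre
                have hndpr' : (pre ++ rs).Nodup := hndPR.sublist hsubPR
                have hpermPool : ((p ++ [x]) ++ (pre ++ rs)).Perm (p ++ (pre ++ x :: rs)) := by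
                  rw [List.append_assoc]
                  exact List.Perm.append_left p (by simpa using List.perm_middle.symm)
                have hndc : ((p ++ [x]) ++ (pre ++ rs)).Nodup := hpermPool.nodup_iff.mpr hnd2
                have hsrtc : (pre ++ rs).Pairwise (· < ·) := hsrt2.sublist hsubPR
                have hposc : ∀ z ∈ pre ++ rs, 0 < z := fun z hz => hpos2 z (hsubPR.subset hz)
                have hlenc : (pre ++ rs).length < fuel := by
                  simp only [List.length_append, List.length_cons] at hlen2 ⊢; omega
                rw [IH (p ++ [x]) (pre ++ rs) (k - 1) (n - x) out hndc hsrtc hposc hlenc]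
                have hfg : (fun S => dsort ((p ++ [x]) ++ S)) =
                    (fun S : List Int => dsort (p ++ (x :: S))) := by
                  funext S; rw [List.append_assoc]; rfl
                rw [hfg]
                -- absorb the combinations that touch `pre`: they are already in `out`
                have habs : ((C (pre ++ rs) (k - 1) (n - x)).map
                      (fun S => dsort (p ++ (x :: S)))).filter (fun s => decide (s ∉ out)) =
                    ((C rs (k - 1) (n - x)).map
                      (fun S => dsort (p ++ (x :: S)))).filter (fun s => decide (s ∉ out)) := by
                  rw [List.filter_map, List.filter_map]
                  congr 1
                  rw [filter_filter_of_imp (C (pre ++ rs) (k - 1) (n - x)) _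
                    (fun S => decide (∀ a ∈ pre, a ∉ S)) ?_]
                  · rw [C_filter pre rs _ _ hndpr']
                  · intro S hS hfalse
                    simp only [decide_eq_false_iff_not, not_forall] at hfalse
                    obtain ⟨a, hapre, haS⟩ := hfalse
                    simp only [not_not] at haS
                    obtain ⟨hsub, hlenS, hsumS⟩ := mem_C _ _ _ _ hS
                    have hxS : x ∉ S := fun hxm => by
                      rcases List.mem_append.mp (hsub.subset hxm) with h | h
                      · exact hxpre h
                      · exact hxrs h
                    have hSnodup : (x :: S).Nodup :=
                      List.nodup_cons.mpr ⟨hxS, hsub.nodup hndpr'⟩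
                    have hTperm : (dsort (x :: S)).Perm (x :: S) := dsort_perm _
                    have hTsorted : (dsort (x :: S)).Pairwise (· < ·) :=
                      pairwise_lt_of_le_nodup _
                        (PySem.List.sorted_pairwise (x :: S) (fun y => y))
                        (hTperm.nodup_iff.mpr hSnodup)
                    have hmem := hout (dsort (x :: S)) hTsorted
                      (fun b hb => by
                        rcases List.mem_cons.mp (hTperm.subset hb) with rfl | hb
                        · exact hxmem
                        · rcases List.mem_append.mp (hsub.subset hb) with h | h
                          · exact List.mem_append.mpr (Or.inl h)
                          · exact List.mem_append.mpr (Or.inr (List.mem_cons_of_mem _ h)))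
                      (by
                        have := hTperm.length_eq
                        simp only [List.length_cons] at this
                        push_cast [this]
                        omega)
                      (by
                        have := hTperm.sum_eq
                        simp only [List.sum_cons] at this
                        omega)
                      ⟨a, hTperm.mem_iff.mpr (List.mem_cons_of_mem _ haS), hapre⟩
                    have heqg : dsort (p ++ (x :: S)) = dsort (p ++ dsort (x :: S)) :=
                      dsort_congr (List.Perm.append_left p hTperm.symm)
                    simp only [Function.comp_apply, decide_eq_false_iff_not, not_not]
                    rw [heqg]
                    exact hmem
                -- run the rest of the loop
                have hloopeq : (pre ++ [x]) ++ rs = pre ++ x :: rs := by simp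
                rw [ihr (pre ++ [x])
                  (F out ((C (pre ++ rs) (k - 1) (n - x)).map (fun S => dsort (p ++ (x :: S)))))
                  (by rw [hloopeq]; exact hnd2)
                  (by rw [hloopeq]; exact hsrt2)
                  (by rw [hloopeq]; exact hpos2)
                  (by simp only [List.length_append, List.length_cons,
                        List.length_nil] at hlen2 ⊢; omega)
                  ?_]
                · -- final F algebra
                  have hFN : F out ((C (pre ++ rs) (k - 1) (n - x)).map
                        (fun S => dsort (p ++ (x :: S)))) =
                      F out ((C rs (k - 1) (n - x)).map (fun S => dsort (p ++ (x :: S)))) := by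
                    unfold F; rw [habs]
                  rw [hFN, F_F]
                  · rw [C_pos_cons _ _ _ hk, List.map_append, List.map_map]
                    rfl
                  · intro y hy hyN
                    obtain ⟨S2, hS2, rfl⟩ := List.mem_map.mp hy
                    obtain ⟨S1, hS1, heq⟩ := List.mem_map.mp hyN
                    have hperm := dsort_inj_perm heq
                    have hxin : x ∈ p ++ S2 := hperm.mem_iff.mp (by simp)
                    rcases List.mem_append.mp hxin with h | h
                    · exact hxnp h
                    · exact hxrs ((mem_C _ _ _ _ hS2).1.subset h)
                · -- the accumulated output now covers everything meeting pre ++ [x]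
                  intro S hSp hSsub hSlen hSsum ⟨a, haS, hapre1⟩
                  rcases List.mem_append.mp hapre1 with hapre | hax
                  · exact mem_F_left (hout S hSp
                      (fun b hb => by
                        have := hSsub b hb
                        rw [hloopeq] at this
                        exact this)
                      hSlen hSsum ⟨a, haS, hapre⟩)
                  · have hax' : a = x := by simpa using hax
                    subst hax'
                    apply mem_F_of_mem
                    have hSnd : S.Nodup := hSp.imp ne_of_lt
                    have hS' : S.erase a ∈ C (pre ++ rs) (k - 1) (n - a) := by
                      apply mem_C_of
                      · apply sublist_of_sorted_subset _ _ hsrtc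
                          (hSp.sublist (List.erase_sublist ..))
                        intro b hb
                        have hbS : b ∈ S := List.mem_of_mem_erase hb
                        have hbx : b ≠ a := ((List.Nodup.mem_erase_iff hSnd).mp hb).1
                        have := hSsub b hbS
                        rw [hloopeq] at this
                        rcases List.mem_append.mp this with h | h
                        · exact List.mem_append.mpr (Or.inl h)
                        · rcases List.mem_cons.mp h with rfl | h
                          · exact absurd rfl hbx
                          · exact List.mem_append.mpr (Or.inr h)
                      · rw [List.length_erase_of_mem haS]
                        have hpos' : 1 ≤ S.length := List.length_pos_of_mem haS
                        push_cast [Nat.cast_sub hpos'] at hSlen ⊢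
                        omega
                      · have := (List.perm_cons_erase haS).sum_eq
                        simp only [List.sum_cons] at this
                        omega
                    have heq2 : dsort (p ++ S) = dsort (p ++ (a :: S.erase a)) :=
                      dsort_congr (List.Perm.append_left p (List.perm_cons_erase haS))
                    rw [heq2]
                    exact List.mem_map.mpr ⟨S.erase a, hS', rfl⟩
          rw [hloop nums [] out
            (by
              simp only [List.nil_append]
              exact (hpperm.append_right nums).nodup_iff.mpr hnd)
            (by simpa using hsrt)
            (by simpa using hpos)
            (by simpa using Nat.lt_succ_iff.mp hlen)
            (by rintro S _ _ _ _ ⟨a, _, ha⟩; exact absurd ha List.not_mem_nil)]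
          simp only [hfun]

theorem solution_eq (k n : Int) :
    solution k n = C (PySem.List.pyRange 1 9 1) k n := by
  unfold solution
  rw [backA_eq 9 [] (PySem.List.pyRange 1 9 1) k n []
    (by decide) (by decide) (by decide) (by decide)]
  have hRsrt : (PySem.List.pyRange 1 9 1).Pairwise (· < ·) := by decide
  have h1 : ∀ S ∈ C (PySem.List.pyRange 1 9 1) k n, dsort ([] ++ S) = S := by
    intro S hS
    rw [List.nil_append]
    exact dsort_eq_self (hRsrt.sublist (mem_C _ _ _ _ hS).1)
  rw [List.map_congr_left h1]
  simp [F]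

-- ---- port B: the powerset fold, then the filter, equal the spec list ----

-- the subset list in exactly the order B's fold produces it
def powOf : List Int → List (List Int)
  | [] => [[]]
  | x :: xs => (powOf xs).map (x :: ·) ++ powOf xs

theorem foldl_powOf : ∀ (l m : List Int),
    l.foldl (fun acc d => acc.map (fun c => d :: c) ++ acc) (powOf m) =
      powOf (l.reverse ++ m) := by
  intro l
  induction l with
  | nil => intro m; simp
  | cons d ds ih =>
    intro m
    have hstep : (powOf m).map (fun c => d :: c) ++ powOf m = powOf (d :: m) := rfl
    simp only [List.foldl_cons, hstep, ih (d :: m), List.reverse_cons, List.append_assoc,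
      List.singleton_append]

theorem filter_powOf : ∀ (L : List Int) (k n : Int),
    (powOf L).filter (fun c => decide ((c.length : Int) = k ∧ c.sum = n)) = C L k n := by
  intro L
  induction L with
  | nil =>
    intro k n
    rw [C.eq_def]
    by_cases hk : k = 0
    · subst hk
      by_cases hn : n = 0
      · subst hn; simp [powOf]
      · simp [powOf, hn, Ne.symm hn]
    · by_cases hkn : k < 0
      · simp [powOf, hk, hkn, Ne.symm hk]
      · simp [powOf, hk, hkn, Ne.symm hk]
  | cons x xs ih =>
    intro k n
    simp only [powOf, List.filter_append, List.filter_map]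
    have hpred : (powOf xs).filter
        ((fun c => decide ((c.length : Int) = k ∧ c.sum = n)) ∘ (x :: ·)) =
        (powOf xs).filter (fun c => decide ((c.length : Int) = k - 1 ∧ c.sum = n - x)) := by
      apply List.filter_congr
      intro c _
      simp only [Function.comp_apply, List.length_cons, List.sum_cons, decide_eq_decide]
      constructor
      · rintro ⟨h1, h2⟩; push_cast at h1; omega
      · rintro ⟨h1, h2⟩; push_cast; omega
    rw [hpred, ih, ih, C_cons_all]

theorem solution_alt_eq (k n : Int) :
    solution_alt k n = C (PySem.List.pyRange 1 9 1) k n := by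
  unfold solution_alt
  have h0 : ([[]] : List (List Int)) = powOf [] := rfl
  rw [h0, foldl_powOf, filter_powOf]
  have : (PySem.List.pyRange 8 0 (-1)).reverse ++ [] = PySem.List.pyRange 1 9 1 := by decide
  rw [this]

-- ===== VERDICT (by name: the statement is the Claim_ definition above) =====
theorem solution_spec : Claim_equal_solution := by
  intro k n _
  unfold Spec_solution
  rw [solution_eq, solution_alt_eq]
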